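-- pv_equiv track=rewrite | github.com/nguyenngochuy91/programming | interview/BST/BST.py | binarySearchSmallestLarger
-- ===== SOURCE A (Python) =====
-- def binarySearchSmallestLarger(arr,num):
--     start,stop = 0,len(arr)-1
--     while start<=stop: # has to <= else it wont find all
--         mid = (start+stop)//2
--         if arr[mid]==num:
--             return mid
--         elif arr[mid]<num:
--             start = mid+1
--         else:
--             stop = mid-1
--     return start
-- ===== SOURCE B (Python) =====
-- def binarySearchSmallestLarger(arr, num):
--     # Recursive divide-and-conquer on slices instead of an index loop:
--     # each call searches a sub-list and carries the offset of that sub-list.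
--     def go(sub, off):
--         if not sub:
--             return off
--         mid = (len(sub) - 1) // 2
--         v = sub[mid]
--         if v == num:
--             return off + mid
--         if v < num:
--             return go(sub[mid + 1:], off + mid + 1)
--         return go(sub[:mid], off)
--     return go(arr, 0)
-- ===== Notes on version B (the rewrite author's own statement) =====
-- stated objective: alternative
-- what changed: Replaces the iterative start/stop index loop by a recursive divide-and-conquer on list slices carrying an offset; the midpoint choice and branch order keep the search path identical.
import Mathlib
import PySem

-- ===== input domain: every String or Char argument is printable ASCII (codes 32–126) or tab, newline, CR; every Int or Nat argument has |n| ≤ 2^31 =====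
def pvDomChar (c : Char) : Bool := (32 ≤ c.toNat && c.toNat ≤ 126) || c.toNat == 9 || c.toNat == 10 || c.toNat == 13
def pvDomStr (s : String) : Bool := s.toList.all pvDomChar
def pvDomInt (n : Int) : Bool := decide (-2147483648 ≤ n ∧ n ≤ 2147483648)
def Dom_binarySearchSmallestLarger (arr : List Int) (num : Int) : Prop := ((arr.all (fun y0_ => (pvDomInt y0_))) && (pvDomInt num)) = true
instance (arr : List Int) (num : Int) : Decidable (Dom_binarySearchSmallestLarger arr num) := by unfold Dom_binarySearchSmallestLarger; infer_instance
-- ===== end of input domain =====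

-- B replaces A's iterative start/stop index loop by recursion on list slices with an offset; same search path, same results.

-- ===== PORT A =====
-- termination facts for the loops, named so the definitions stay small (cited in decreasing_by)
lemma pvLoopA_dec_left (start stop : Int) (h : start ≤ stop) :
    (stop + 1 - (PySem.Int.floordiv (start + stop) 2 + 1)).toNat < (stop + 1 - start).toNat := by
  have hb := PySem.Int.floordiv_two_mid_bounds h
  omega

lemma pvLoopA_dec_right (start stop : Int) (h : start ≤ stop) :
    (PySem.Int.floordiv (start + stop) 2 - 1 + 1 - start).toNat < (stop + 1 - start).toNat := by
  have hb := PySem.Int.floordiv_two_mid_bounds h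
  omega

lemma pvGoB_mid_lt (sub : List Int) (hs : sub ≠ []) : (sub.length - 1) / 2 < sub.length := by
  have := List.length_pos_iff.mpr hs
  omega

lemma pvGoB_dec_drop (sub : List Int) (hs : sub ≠ []) :
    (sub.drop ((sub.length - 1) / 2 + 1)).length < sub.length := by
  have := List.length_pos_iff.mpr hs
  simp
  omega

lemma pvGoB_dec_take (sub : List Int) (hs : sub ≠ []) :
    (sub.take ((sub.length - 1) / 2)).length < sub.length := by
  have := List.length_pos_iff.mpr hs
  simp [List.length_take]
  omega

-- the while loop, state (start, stop); arr[mid] is always in range here (start ≤ mid ≤ stop,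
-- reachable only with 0 ≤ start and stop < len), so pyGetD is exact (no IndexError occurs)
def pvLoopA (arr : List Int) (num : Int) (start stop : Int) : Int :=
  if h : start ≤ stop then
    let mid := PySem.Int.floordiv (start + stop) 2
    let v := PySem.List.pyGetD arr mid 0
    if v = num then mid
    else if v < num then pvLoopA arr num (mid + 1) stop
    else pvLoopA arr num start (mid - 1)
  else start
termination_by (stop + 1 - start).toNat
decreasing_by
  · exact pvLoopA_dec_left start stop h
  · exact pvLoopA_dec_right start stop h

def binarySearchSmallestLarger (arr : List Int) (num : Int) : Int :=
  pvLoopA arr num 0 ((arr.length : Int) - 1)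

-- ===== PORT B =====
-- Source B's go: recursion on the sub-list (sub[:mid] / sub[mid+1:] are take/drop for these
-- nonnegative in-range bounds; sub[mid] is always in range since sub ≠ [])
def pvGoB (num : Int) (sub : List Int) (off : Int) : Int :=
  if hs : sub = [] then off
  else
    let mid := (sub.length - 1) / 2
    let v := sub[mid]'(pvGoB_mid_lt sub hs)
    if v = num then off + (mid : Int)
    else if v < num then pvGoB num (sub.drop (mid + 1)) (off + (mid : Int) + 1)
    else pvGoB num (sub.take mid) off
termination_by sub.length
decreasing_by
  · exact pvGoB_dec_drop sub hs
  · exact pvGoB_dec_take sub hs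

def binarySearchSmallestLarger_alt (arr : List Int) (num : Int) : Int :=
  pvGoB num arr 0

-- ===== PRECONDITION & SPEC =====
def Spec_binarySearchSmallestLarger (arr : List Int) (num : Int) (out : Int) : Prop := out = binarySearchSmallestLarger_alt arr num
instance (arr : List Int) (num : Int) (out : Int) : Decidable (Spec_binarySearchSmallestLarger arr num out) := by unfold Spec_binarySearchSmallestLarger; infer_instance

-- ===== CLAIM (what is proved, stated in full; the proofs are below) =====
def Claim_equal_binarySearchSmallestLarger : Prop := ∀ (arr : List Int) (num : Int), Dom_binarySearchSmallestLarger arr num → Spec_binarySearchSmallestLarger arr num (binarySearchSmallestLarger arr num)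

-- ===== LEMMAS AND PROOFS =====

-- A's loop on the interval [start, stop] equals B's recursion on the slice arr[start : stop+1] with offset start.
lemma pvLoop_eq_go (arr : List Int) (num : Int) :
    ∀ (n : Nat) (start stop : Int), 0 ≤ start → stop < (arr.length : Int) →
      (stop + 1 - start).toNat = n →
      pvLoopA arr num start stop =
        pvGoB num ((arr.drop start.toNat).take (stop + 1 - start).toNat) start := by
  intro n
  induction n using Nat.strong_induction_on with
  | _ n ih =>
    intro start stop hs0 hsl hn
    by_cases h : start ≤ stop
    · -- nonempty interval
      obtain ⟨L, hL⟩ : ∃ L, (stop + 1 - start).toNat = L := ⟨_, rfl⟩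
      rw [hL]
      obtain ⟨sub, hsub⟩ : ∃ sub, (arr.drop start.toNat).take L = sub := ⟨_, rfl⟩
      rw [hsub]
      have hlen : sub.length = L := by
        rw [← hsub]
        simp [List.length_take, List.length_drop]
        omega
      have hne : sub ≠ [] := by
        intro hc
        rw [hc] at hlen
        simp at hlen
        omega
      have hb := PySem.Int.floordiv_two_mid_bounds h
      obtain ⟨mid, hmid⟩ : ∃ mid, PySem.Int.floordiv (start + stop) 2 = mid := ⟨_, rfl⟩
      rw [hmid] at hb
      have hme : mid = (start + stop) / 2 := by
        rw [← hmid]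
        exact PySem.Int.floordiv_eq_ediv_of_pos (by omega)
      obtain ⟨m, hm⟩ : ∃ m, (sub.length - 1) / 2 = m := ⟨_, rfl⟩
      -- global midpoint = offset + local midpoint
      have hgm : mid = start + (m : Int) := by
        rw [hme, ← hm, hlen]
        omega
      have hmL : m < L := by omega
      have hmlt : m < sub.length := by omega
      -- the element compared is the same
      have hvel : sub[m]'hmlt = arr[start.toNat + m]'(by omega) := by
        simp only [← hsub, List.getElem_take, List.getElem_drop]
      have hv : PySem.List.pyGetD arr mid 0 = sub[m]'hmlt := by
        rw [PySem.List.pyGetD_eq_getElem arr (i := mid) 0 (by omega) (by omega), hvel]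
        congr 1
        omega
      rw [pvLoopA, pvGoB]
      simp only [dif_pos h, dif_neg hne, hmid, hm, hv]
      by_cases h1 : sub[m]'hmlt = num
      · simp only [if_pos h1]
        omega
      · simp only [if_neg h1]
        by_cases h2 : sub[m]'hmlt < num
        · simp only [if_pos h2]
          have hdrop : sub.drop (m + 1) =
              (arr.drop (mid + 1).toNat).take (stop + 1 - (mid + 1)).toNat := by
            rw [← hsub, List.drop_take, List.drop_drop]
            congr 1
            · omega
            · congr 1
              omega
          rw [ih (stop + 1 - (mid + 1)).toNat (by omega) (mid + 1) stop (by omega) hsl rfl,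
              hdrop]
          congr 1
          omega
        · simp only [if_neg h2]
          have htake : sub.take m =
              (arr.drop start.toNat).take ((mid - 1) + 1 - start).toNat := by
            rw [← hsub, List.take_take]
            congr 1
            omega
          rw [ih ((mid - 1) + 1 - start).toNat (by omega) start (mid - 1) hs0 (by omega) rfl,
              htake]
    · -- empty interval: both return start
      have hemp : (arr.drop start.toNat).take (stop + 1 - start).toNat = [] := by
        have : (stop + 1 - start).toNat = 0 := by omega
        simp [this]
      rw [pvLoopA, hemp, pvGoB]
      simp [h]

-- ===== VERDICT (by name: the statement is the Claim_ definition above) =====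
theorem binarySearchSmallestLarger_spec : Claim_equal_binarySearchSmallestLarger := by
  intro arr num _
  unfold Spec_binarySearchSmallestLarger binarySearchSmallestLarger binarySearchSmallestLarger_alt
  rw [pvLoop_eq_go arr num ((arr.length : Int) - 1 + 1 - 0).toNat 0 ((arr.length : Int) - 1)
      (by omega) (by omega) rfl]
  have h : ((arr.length : Int) - 1 + 1 - 0).toNat = arr.length := by omega
  rw [h]
  simp
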